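-- pv_equiv track=rewrite | github.com/EricWangyz/Exercises | Exam4Job/ZTE/舞蹈早晚课程0906.py | perfectDancer
-- ===== SOURCE A (Python) =====
-- def perfectDancer(countMorning, countEvening, morningList, eveningList):
--     commonID = []
--     for i in morningList:
--         if i in eveningList:
--             commonID.append(i)
--
--     for j in commonID:
--         while j in eveningList:
--             eveningList.remove(j)
--         while j in morningList:
--             morningList.remove(j)
--
--     return len(morningList + eveningList)
-- ===== SOURCE B (Python) =====
-- def perfectDancer(countMorning, countEvening, morningList, eveningList):
--     common = set(morningList) & set(eveningList)
--     morningList[:] = [x for x in morningList if x not in common]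
--     eveningList[:] = [x for x in eveningList if x not in common]
--     return len(morningList) + len(eveningList)
-- ===== Notes on version B (the rewrite author's own statement) =====
-- stated objective: faster
-- what changed: Replaces the nested membership scan plus repeated destructive remove-while loops with one shared-ID set built once and a single linear filtering pass over each list (same in-place mutation via slice assignment).
import Mathlib
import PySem

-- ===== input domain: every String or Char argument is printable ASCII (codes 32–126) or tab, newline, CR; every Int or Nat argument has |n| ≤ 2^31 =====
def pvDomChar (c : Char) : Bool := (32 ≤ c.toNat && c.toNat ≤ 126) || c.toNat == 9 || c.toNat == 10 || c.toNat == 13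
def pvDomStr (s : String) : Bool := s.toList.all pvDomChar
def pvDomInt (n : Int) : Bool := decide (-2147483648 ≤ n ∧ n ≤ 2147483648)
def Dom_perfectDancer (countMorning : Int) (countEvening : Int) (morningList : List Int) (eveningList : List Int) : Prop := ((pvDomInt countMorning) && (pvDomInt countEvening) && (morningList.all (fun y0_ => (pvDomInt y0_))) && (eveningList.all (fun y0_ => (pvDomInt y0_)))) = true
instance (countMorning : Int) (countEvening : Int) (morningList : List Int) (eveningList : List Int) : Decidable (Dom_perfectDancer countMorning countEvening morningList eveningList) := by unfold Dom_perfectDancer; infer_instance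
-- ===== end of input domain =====

-- B builds the shared-ID set once and filters each list in a single linear pass, instead of
-- A's nested membership scan plus repeated remove-while loops. Both A and B mutate the two
-- list arguments in place (B via slice assignment); the equivalence proved here is about the
-- return value.

-- ===== PORT A =====
-- termination helper for the 'while j in l: l.remove(j)' loop (cited by decreasing_by)
theorem pvRemove?_length_lt {l l' : List Int} {j : Int}
    (h : PySem.List.remove? l j = some l') : l'.length < l.length := by
  have hmem : j ∈ l := by
    by_contra hn
    rw [(PySem.List.remove?_eq_none_iff l j).mpr hn] at h
    simp at h
  rw [PySem.List.remove?_eq_some_erase l j hmem] at h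
  have hl' : l' = l.erase j := (Option.some.inj h).symm
  have h1 := List.length_erase_of_mem hmem
  have h2 : 0 < l.length := List.length_pos_of_mem hmem
  rw [hl', h1]
  omega

-- 'while j in l: l.remove(j)'
def pvWhileRemove (j : Int) (l : List Int) : List Int :=
  match h : PySem.List.remove? l j with
  | some l' => pvWhileRemove j l'
  | none => l
termination_by l.length
decreasing_by exact pvRemove?_length_lt h

def perfectDancer (countMorning : Int) (countEvening : Int) (morningList : List Int) (eveningList : List Int) : Int :=
  -- commonID = []; for i in morningList: if i in eveningList: commonID.append(i)
  let commonID : List Int :=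
    morningList.foldl (fun acc i => if i ∈ eveningList then acc ++ [i] else acc) []
  -- for j in commonID: while j in eveningList: remove; while j in morningList: remove
  let final : List Int × List Int :=
    commonID.foldl (fun p j => (pvWhileRemove j p.1, pvWhileRemove j p.2))
      (morningList, eveningList)
  ((final.1 ++ final.2).length : Int)

-- ===== PORT B =====
def perfectDancer_alt (countMorning : Int) (countEvening : Int) (morningList : List Int) (eveningList : List Int) : Int :=
  -- common = set(morningList) & set(eveningList)
  let common : PySem.Set Int := PySem.Set.inter (PySem.Set.ofList morningList) (PySem.Set.ofList eveningList)
  -- morningList[:] = [x for x in morningList if x not in common]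
  let m : List Int := morningList.filter (fun x => !(PySem.Set.contains common x))
  -- eveningList[:] = [x for x in eveningList if x not in common]
  let e : List Int := eveningList.filter (fun x => !(PySem.Set.contains common x))
  (m.length : Int) + (e.length : Int)

-- ===== PRECONDITION & SPEC =====
def Spec_perfectDancer (countMorning : Int) (countEvening : Int) (morningList : List Int) (eveningList : List Int) (out : Int) : Prop := out = perfectDancer_alt countMorning countEvening morningList eveningList
instance (countMorning : Int) (countEvening : Int) (morningList : List Int) (eveningList : List Int) (out : Int) : Decidable (Spec_perfectDancer countMorning countEvening morningList eveningList out) := by unfold Spec_perfectDancer; infer_instance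

-- ===== CLAIM (what is proved, stated in full; the proofs are below) =====
def Claim_equal_perfectDancer : Prop := ∀ (countMorning : Int) (countEvening : Int) (morningList : List Int) (eveningList : List Int), Dom_perfectDancer countMorning countEvening morningList eveningList → Spec_perfectDancer countMorning countEvening morningList eveningList (perfectDancer countMorning countEvening morningList eveningList)

-- ===== LEMMAS AND PROOFS =====

-- erasing one occurrence of j does not change the filter that drops all j
theorem pvFilter_erase (j : Int) (l : List Int) :
    (l.erase j).filter (fun x => x != j) = l.filter (fun x => x != j) := by
  induction l with
  | nil => simp
  | cons a l ih =>
    by_cases h : a = j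
    · subst h; simp
    · rw [List.erase_cons_tail (by simpa using h)]
      simp only [List.filter_cons, ih]

theorem pvWhileRemove_eq_filter (j : Int) (l : List Int) :
    pvWhileRemove j l = l.filter (fun x => x != j) := by
  induction l using pvWhileRemove.induct j with
  | case1 l l' h ih =>
    have hmem : j ∈ l := by
      by_contra hn
      rw [(PySem.List.remove?_eq_none_iff l j).mpr hn] at h
      simp at h
    have hl' : l' = l.erase j := by
      rw [PySem.List.remove?_eq_some_erase l j hmem] at h
      exact (Option.some.inj h).symm
    rw [pvWhileRemove]
    split
    · rename_i l'' heq
      rw [h] at heq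
      cases Option.some.inj heq
      rw [ih, hl', pvFilter_erase]
    · rename_i heq
      rw [heq] at h
      simp at h
  | case2 l h =>
    have hnot : j ∉ l := (PySem.List.remove?_eq_none_iff l j).mp h
    rw [pvWhileRemove]
    split
    · rename_i l'' heq
      rw [h] at heq
      simp at heq
    symm
    exact List.filter_eq_self.mpr (fun a ha => by
      simp only [bne_iff_ne, ne_eq, decide_eq_true_eq]
      exact fun he => hnot (he ▸ ha))

-- A's remove loop over cs filters out every element of cs from both lists
theorem pvFoldl_remove (cs : List Int) (m e : List Int) :
    cs.foldl (fun p j => (pvWhileRemove j p.1, pvWhileRemove j p.2)) (m, e)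
      = (m.filter (fun x => !(cs.contains x)), e.filter (fun x => !(cs.contains x))) := by
  induction cs generalizing m e with
  | nil => simp
  | cons c cs ih =>
    simp only [List.foldl_cons]
    rw [ih, pvWhileRemove_eq_filter, pvWhileRemove_eq_filter,
        List.filter_filter, List.filter_filter]
    simp only [Prod.mk.injEq]
    constructor <;>
    · apply List.filter_congr
      intro x _
      by_cases h : x = c <;> simp [h]

-- x ∈ commonID ↔ x ∈ morningList ∧ x ∈ eveningList
theorem pvMem_commonID (m e : List Int) (x : Int) (acc : List Int) :
    x ∈ m.foldl (fun acc i => if i ∈ e then acc ++ [i] else acc) acc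
      ↔ x ∈ acc ∨ (x ∈ m ∧ x ∈ e) := by
  induction m generalizing acc with
  | nil => simp
  | cons a m ih =>
    simp only [List.foldl_cons]
    by_cases h : a ∈ e
    · have hx : x = a → x ∈ e := fun he => he ▸ h
      rw [if_pos h]
      simp [ih]
      tauto
    · have hx : x = a → x ∉ e := fun he => he ▸ h
      rw [if_neg h]
      simp [ih]
      tauto

theorem perfectDancer_eq (cM cE : Int) (m e : List Int) :
    perfectDancer cM cE m e = perfectDancer_alt cM cE m e := by
  unfold perfectDancer perfectDancer_alt
  dsimp only
  rw [pvFoldl_remove]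
  have hfun : (fun x : Int =>
        !(m.foldl (fun acc i => if i ∈ e then acc ++ [i] else acc) []).contains x)
      = (fun x : Int =>
        !PySem.Set.contains (PySem.Set.inter (PySem.Set.ofList m) (PySem.Set.ofList e)) x) := by
    funext x
    have hc : (m.foldl (fun acc i => if i ∈ e then acc ++ [i] else acc) []).contains x
        = (decide (x ∈ m) && decide (x ∈ e)) := by
      by_cases h1 : x ∈ m <;> by_cases h2 : x ∈ e <;>
        simp [List.contains_iff_mem, pvMem_commonID, h1, h2]
    have hs : PySem.Set.contains (PySem.Set.inter (PySem.Set.ofList m) (PySem.Set.ofList e)) x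
        = (decide (x ∈ m) && decide (x ∈ e)) := by
      simp only [PySem.Set.contains_eq_listContains]
      by_cases h1 : x ∈ m <;> by_cases h2 : x ∈ e <;>
        simp [List.contains_iff_mem, PySem.Set.mem_inter, PySem.Set.mem_ofList, h1, h2]
    rw [hc, hs]
  rw [hfun]
  simp only [List.length_append]
  push_cast
  ring

-- ===== VERDICT (by name: the statement is the Claim_ definition above) =====
theorem perfectDancer_spec : Claim_equal_perfectDancer := by
  intro cM cE m e _
  unfold Spec_perfectDancer
  exact perfectDancer_eq cM cE m e
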